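-- pv_equiv track=rewrite | github.com/nijval21/MiniProject | model_predict.py | process_text_response
-- ===== SOURCE A (Python) =====
-- def process_text_response(text):
--     """Process a text response if JSON parsing fails"""
--     vulnerabilities = []
--     lines = text.split('\n')
--
--     current_vuln = None
--     current_section = None
--
--     for line in lines:
--         line = line.strip()
--         if not line:
--             continue
--
--         # Try to identify vulnerability headings
--         if line[0].isdigit() and ('[CRITICAL]' in line or '[HIGH]' in line or
--                                  '[MEDIUM]' in line or '[LOW]' in line):
--             # Save previous vulnerability if exists
--             if current_vuln:
--                 vulnerabilities.append(current_vuln)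
--
--             # Start new vulnerability
--             severity = None
--             if '[CRITICAL]' in line:
--                 severity = 'Critical'
--             elif '[HIGH]' in line:
--                 severity = 'High'
--             elif '[MEDIUM]' in line:
--                 severity = 'Medium'
--             elif '[LOW]' in line:
--                 severity = 'Low'
--
--             name_part = line.split(':', 1)
--             name = name_part[0].split(']', 1)[1].strip() if len(name_part) > 0 else "Unknown Vulnerability"
--             description = name_part[1].strip() if len(name_part) > 1 else ""
--
--             current_vuln = {
--                 "name": name,
--                 "severity": severity,
--                 "description": description,
--                 "impact": "",
--                 "mitigation": ""
--             }
--             current_section = None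
--
--         elif current_vuln:
--             # Check for sections
--             if line.lower().startswith('impact:'):
--                 current_section = 'impact'
--                 current_vuln['impact'] = line[7:].strip()
--             elif line.lower().startswith('mitigation:'):
--                 current_section = 'mitigation'
--                 current_vuln['mitigation'] = line[11:].strip()
--             elif current_section:
--                 # Append to current section
--                 current_vuln[current_section] += " " + line
--
--     # Add the last vulnerability
--     if current_vuln:
--         vulnerabilities.append(current_vuln)
--
--     # If no vulnerabilities extracted, create a default one
--     if not vulnerabilities:
--         vulnerabilities.append({
--             "name": "Analysis Result",
--             "severity": "Info",
--             "description": text[:300],  # Take first 300 chars as description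
--             "impact": "See description",
--             "mitigation": "See description"
--         })
--
--     return vulnerabilities
-- ===== SOURCE B (Python) =====
-- def process_text_response(text):
--     """Process a text response if JSON parsing fails"""
--     TAGS = (('[CRITICAL]', 'Critical'), ('[HIGH]', 'High'),
--             ('[MEDIUM]', 'Medium'), ('[LOW]', 'Low'))
--
--     def severity_of(line):
--         for tag, sev in TAGS:
--             if tag in line:
--                 return sev
--         return None
--
--     def is_heading(line):
--         return line[:1].isdigit() and severity_of(line) is not None
--
--     def parse_block(block):
--         head, rest = block[0], block[1:]
--         name_part = head.split(':', 1)
--         vuln = {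
--             "name": name_part[0].split(']', 1)[1].strip(),
--             "severity": severity_of(head),
--             "description": name_part[1].strip() if len(name_part) > 1 else "",
--             "impact": "",
--             "mitigation": "",
--         }
--         section = None
--         for line in rest:
--             low = line.lower()
--             if low.startswith('impact:'):
--                 section = 'impact'
--                 vuln['impact'] = line[7:].strip()
--             elif low.startswith('mitigation:'):
--                 section = 'mitigation'
--                 vuln['mitigation'] = line[11:].strip()
--             elif section:
--                 vuln[section] += " " + line
--         return vuln
--
--     # phase 1: group the stripped non-empty lines into one block per heading,
--     # dropping any lines that precede the first heading
--     blocks = []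
--     for raw in text.split('\n'):
--         line = raw.strip()
--         if not line:
--             continue
--         if is_heading(line):
--             blocks.append([line])
--         elif blocks:
--             blocks[-1].append(line)
--
--     if not blocks:
--         return [{
--             "name": "Analysis Result",
--             "severity": "Info",
--             "description": text[:300],
--             "impact": "See description",
--             "mitigation": "See description",
--         }]
--     # phase 2: each block is parsed on its own
--     return [parse_block(b) for b in blocks]
-- ===== Notes on version B (the rewrite author's own statement) =====
-- stated objective: alternative
-- what changed: A runs one streaming state machine (vulns list + current_vuln dict + current_section) over all lines; B first splits the stripped non-empty lines into one block per heading line and then maps an independent parse_block helper over the blocks.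
import Mathlib
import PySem

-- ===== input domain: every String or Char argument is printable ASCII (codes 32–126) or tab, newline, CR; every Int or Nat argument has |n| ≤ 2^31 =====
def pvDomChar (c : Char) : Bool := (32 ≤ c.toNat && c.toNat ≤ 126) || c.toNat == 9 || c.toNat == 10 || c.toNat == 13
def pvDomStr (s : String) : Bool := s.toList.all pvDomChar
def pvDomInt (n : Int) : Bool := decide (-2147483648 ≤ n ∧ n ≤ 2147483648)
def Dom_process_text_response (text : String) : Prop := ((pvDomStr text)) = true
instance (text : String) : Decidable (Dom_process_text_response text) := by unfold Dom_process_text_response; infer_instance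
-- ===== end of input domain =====

-- B restructures A's streaming state machine into a two-phase pipeline (split the lines into
-- one block per heading, then parse each block independently); same cost, no speed claim.

-- ===== PORT A =====
-- helpers for A: heading test, severity chain, new-vulnerability dict, section handling
def pvIsHeadingA (s : String) : Bool :=
  (match PySem.Str.pyGet? s 0 with          -- line[0]; only reached on non-empty lines
   | some c => PySem.Chars.isdigit c
   | none => false)
  && (PySem.Str.isIn "[CRITICAL]" s || PySem.Str.isIn "[HIGH]" s
      || PySem.Str.isIn "[MEDIUM]" s || PySem.Str.isIn "[LOW]" s)

def pvSeverityA (s : String) : String :=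
  if PySem.Str.isIn "[CRITICAL]" s then "Critical"
  else if PySem.Str.isIn "[HIGH]" s then "High"
  else if PySem.Str.isIn "[MEDIUM]" s then "Medium"
  else if PySem.Str.isIn "[LOW]" s then "Low"
  else ""   -- Python leaves severity = None; dead under the heading guard, which requires a tag

def pvNewVulnA (s : String) : PySem.Dict String String :=
  let name_part := (PySem.Str.splitMax? s ":" 1).getD []   -- sep ':' ≠ "": never none
  -- name_part[0].split(']',1)[1] raises IndexError when ']' ∉ name_part[0]: excluded by Pre_
  let name := if 0 < name_part.length then
      PySem.Str.strip (PySem.List.pyGetD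
        ((PySem.Str.splitMax? (PySem.List.pyGetD name_part 0 "") "]" 1).getD []) 1 "")
    else "Unknown Vulnerability"
  let description := if 1 < name_part.length then PySem.Str.strip (PySem.List.pyGetD name_part 1 "") else ""
  PySem.Dict.ofList [("name", name), ("severity", pvSeverityA s), ("description", description),
                     ("impact", ""), ("mitigation", "")]

def pvSectionStepA (v : PySem.Dict String String) (sec : Option String) (s : String) :
    PySem.Dict String String × Option String :=
  if PySem.Str.startswith (PySem.Str.lower s) "impact:" then
    (v.insert "impact" (PySem.Str.strip (PySem.Str.slice s (some 7) none)), some "impact")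
  else if PySem.Str.startswith (PySem.Str.lower s) "mitigation:" then
    (v.insert "mitigation" (PySem.Str.strip (PySem.Str.slice s (some 11) none)), some "mitigation")
  else match sec with
    | some k => (v.modify k "" (fun w => w ++ " " ++ s), sec)   -- key k is always present
    | none => (v, none)

def pvStepA (st : List (PySem.Dict String String) × Option (PySem.Dict String String) × Option String)
    (raw : String) :
    List (PySem.Dict String String) × Option (PySem.Dict String String) × Option String :=
  let line := PySem.Str.strip raw
  if line = "" then st
  else if pvIsHeadingA line then
    ((match st.2.1 with | some v => st.1 ++ [v] | none => st.1), some (pvNewVulnA line), none)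
  else match st.2.1 with
    | some v => let p := pvSectionStepA v st.2.2 line; (st.1, some p.1, p.2)
    | none => st

def pvDefaultVulnA (text : String) : PySem.Dict String String :=
  PySem.Dict.ofList [("name", "Analysis Result"), ("severity", "Info"),
    ("description", PySem.Str.slice text none (some 300)),
    ("impact", "See description"), ("mitigation", "See description")]

def process_text_response (text : String) : List (List (String × String)) :=
  let lines := (PySem.Str.split? text "\n").getD []   -- sep '\n' ≠ "": never none
  let st := lines.foldl pvStepA ([], none, none)
  let vulns := match st.2.1 with | some v => st.1 ++ [v] | none => st.1
  let vulns := if vulns = [] then [pvDefaultVulnA text] else vulns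
  vulns.map PySem.Dict.items

-- ===== PORT B =====
-- helpers for B: severity lookup over the tag table, heading test, block splitting, block parser
def pvSevB (line : String) : Option String :=
  (([("[CRITICAL]", "Critical"), ("[HIGH]", "High"), ("[MEDIUM]", "Medium"), ("[LOW]", "Low")].find?
     (fun p => PySem.Str.isIn p.1 line)).map (fun p => p.2))

def pvIsHeadingB (line : String) : Bool :=
  PySem.Str.strIsdigit (PySem.Str.slice line none (some 1)) && (pvSevB line).isSome

def pvSectionStepB (v : PySem.Dict String String) (sec : Option String) (s : String) :
    PySem.Dict String String × Option String :=
  if PySem.Str.startswith (PySem.Str.lower s) "impact:" then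
    (v.insert "impact" (PySem.Str.strip (PySem.Str.slice s (some 7) none)), some "impact")
  else if PySem.Str.startswith (PySem.Str.lower s) "mitigation:" then
    (v.insert "mitigation" (PySem.Str.strip (PySem.Str.slice s (some 11) none)), some "mitigation")
  else match sec with
    | some k => (v.modify k "" (fun w => w ++ " " ++ s), sec)
    | none => (v, none)

def pvInitVulnB (head : String) : PySem.Dict String String :=
  let name_part := (PySem.Str.splitMax? head ":" 1).getD []   -- sep ':' ≠ "": never none
  -- name_part[0].split(']',1)[1] raises IndexError when ']' ∉ name_part[0]: excluded by Pre_
  PySem.Dict.ofList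
    [("name", PySem.Str.strip (PySem.List.pyGetD
        ((PySem.Str.splitMax? (PySem.List.pyGetD name_part 0 "") "]" 1).getD []) 1 "")),
     ("severity", (pvSevB head).getD ""),   -- the None case is dead: a block head carries a tag
     ("description", if 1 < name_part.length then PySem.Str.strip (PySem.List.pyGetD name_part 1 "") else ""),
     ("impact", ""), ("mitigation", "")]

def pvParseBlockB (b : List String) : PySem.Dict String String :=
  match b with
  | [] => PySem.Dict.empty     -- unreachable: every block starts with its heading line
  | head :: rest =>
    (rest.foldl (fun st s => pvSectionStepB st.1 st.2 s) (pvInitVulnB head, (none : Option String))).1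

def pvAppendLast (bs : List (List String)) (s : String) : List (List String) :=
  match bs with
  | [] => []
  | [b] => [b ++ [s]]
  | b :: rest => b :: pvAppendLast rest s

def pvStepB (bs : List (List String)) (raw : String) : List (List String) :=
  let line := PySem.Str.strip raw
  if line = "" then bs
  else if pvIsHeadingB line then bs ++ [[line]]
  else if bs = [] then bs
  else pvAppendLast bs line       -- blocks[-1].append(line)

def pvDefaultVulnB (text : String) : PySem.Dict String String :=
  PySem.Dict.ofList [("name", "Analysis Result"), ("severity", "Info"),
    ("description", PySem.Str.slice text none (some 300)),
    ("impact", "See description"), ("mitigation", "See description")]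

def process_text_response_alt (text : String) : List (List (String × String)) :=
  let blocks := ((PySem.Str.split? text "\n").getD []).foldl pvStepB []
  if blocks = [] then [pvDefaultVulnB text].map PySem.Dict.items
  else (blocks.map pvParseBlockB).map PySem.Dict.items

-- ===== PRECONDITION & SPEC =====
-- Pre_ excludes exactly the inputs on which A raises IndexError: a heading line whose part
-- before the first colon contains no closing bracket, so the second piece of the bracket
-- split does not exist.
def Pre_process_text_response (text : String) : Prop :=
  ∀ l ∈ (PySem.Str.split? text "\n").getD [],
    pvIsHeadingA (PySem.Str.strip l) = true →
    PySem.Str.isIn "]" (PySem.List.pyGetD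
      ((PySem.Str.splitMax? (PySem.Str.strip l) ":" 1).getD []) 0 "") = true
instance (text : String) : Decidable (Pre_process_text_response text) := by
  unfold Pre_process_text_response; infer_instance

def pvWitness_process_text_response : String := "1. [HIGH] SQLi: bad\nImpact: data loss\nMitigation: escape"

def Spec_process_text_response (text : String) (out : List (List (String × String))) : Prop := out = process_text_response_alt text
instance (text : String) (out : List (List (String × String))) : Decidable (Spec_process_text_response text out) := by unfold Spec_process_text_response; infer_instance

-- ===== CLAIM (what is proved, stated in full; the proofs are below) =====
def Claim_equal_process_text_response : Prop := ∀ (text : String), Dom_process_text_response text → Pre_process_text_response text → Spec_process_text_response text (process_text_response text)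

-- ===== LEMMAS AND PROOFS =====

-- split(sep, maxsplit) never returns an empty list
theorem pvGoNeNil (sep : List Char) : ∀ (fuel m : Nat) (l cur : List Char) (acc : List (List Char)),
    PySem.Chars.splitOnMax.go sep fuel m l cur acc ≠ [] := by
  intro fuel
  induction fuel with
  | zero => intro m l cur acc; simp [PySem.Chars.splitOnMax.go]
  | succ n ih =>
    intro m l cur acc
    cases l with
    | nil => simp [PySem.Chars.splitOnMax.go]
    | cons c rest =>
      rw [PySem.Chars.splitOnMax.go]
      split_ifs with h1 h2
      · simp
      · exact ih _ _ _ _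
      · exact ih _ _ _ _

theorem pvSplitMaxLenPos (s : String) : 0 < ((PySem.Str.splitMax? s ":" 1).getD []).length := by
  simp [PySem.Str.splitMax?, PySem.Chars.splitMax?, PySem.Chars.splitOnMax]
  exact List.length_pos_of_ne_nil (pvGoNeNil _ _ _ _ _ _)

-- the pointwise bridges between A's helpers and B's
theorem pvSev_eq (s : String) : pvSeverityA s = (pvSevB s).getD "" := by
  unfold pvSeverityA pvSevB
  simp only [List.find?]
  cases h1 : PySem.Str.isIn "[CRITICAL]" s <;>
  cases h2 : PySem.Str.isIn "[HIGH]" s <;>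
  cases h3 : PySem.Str.isIn "[MEDIUM]" s <;>
  cases h4 : PySem.Str.isIn "[LOW]" s <;>
  simp_all

theorem pvHeading_eq (s : String) : pvIsHeadingA s = pvIsHeadingB s := by
  unfold pvIsHeadingA pvIsHeadingB
  congr 1
  · simp only [pysem]
    rcases s.toList with _ | ⟨c, t⟩
    · simp [PySem.Chars.strIsdigit, PySem.List.slice, PySem.List.clampIdx]
    · simp [PySem.Chars.strIsdigit, PySem.List.slice, PySem.List.clampIdx]
  · unfold pvSevB
    simp only [List.find?]
    cases h1 : PySem.Str.isIn "[CRITICAL]" s <;>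
    cases h2 : PySem.Str.isIn "[HIGH]" s <;>
    cases h3 : PySem.Str.isIn "[MEDIUM]" s <;>
    cases h4 : PySem.Str.isIn "[LOW]" s <;>
    simp_all

theorem pvNewVuln_eq (s : String) : pvNewVulnA s = pvInitVulnB s := by
  unfold pvNewVulnA pvInitVulnB
  simp only [if_pos (pvSplitMaxLenPos s), pvSev_eq]

theorem pvSectionStep_eq : pvSectionStepA = pvSectionStepB := rfl

-- appending a line to the last block
theorem pvAppendLast_append (bs : List (List String)) (b : List String) (s : String) :
    pvAppendLast (bs ++ [b]) s = bs ++ [b ++ [s]] := by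
  induction bs with
  | nil => rfl
  | cons x xs ih =>
    rcases hx : xs ++ [b] with _ | ⟨y, ys⟩
    · simp at hx
    · simp only [List.cons_append, pvAppendLast, hx]
      rw [← hx, ih]

theorem pvAppendLast_ne_nil (bs : List (List String)) (s : String) (h : bs ≠ []) :
    pvAppendLast bs s ≠ [] := by
  rcases bs with _ | ⟨x, xs⟩
  · simp at h
  · rcases xs with _ | ⟨y, ys⟩ <;> simp [pvAppendLast]

-- how each step function acts, by case on the stripped line
theorem pvStepA_empty (st : List (PySem.Dict String String) × Option (PySem.Dict String String) × Option String)
    (raw : String) (h : PySem.Str.strip raw = "") : pvStepA st raw = st := by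
  simp [pvStepA, h]

theorem pvStepB_empty (bs : List (List String)) (raw : String) (h : PySem.Str.strip raw = "") :
    pvStepB bs raw = bs := by
  simp [pvStepB, h]

theorem pvStepA_heading (st : List (PySem.Dict String String) × Option (PySem.Dict String String) × Option String)
    (raw : String) (h0 : PySem.Str.strip raw ≠ "") (h1 : pvIsHeadingA (PySem.Str.strip raw) = true) :
    pvStepA st raw = ((match st.2.1 with | some v => st.1 ++ [v] | none => st.1),
      some (pvNewVulnA (PySem.Str.strip raw)), none) := by
  simp [pvStepA, h0, h1]

theorem pvStepB_heading (bs : List (List String)) (raw : String)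
    (h0 : PySem.Str.strip raw ≠ "") (h1 : pvIsHeadingB (PySem.Str.strip raw) = true) :
    pvStepB bs raw = bs ++ [[PySem.Str.strip raw]] := by
  simp [pvStepB, h0, h1]

theorem pvStepA_other (vulns : List (PySem.Dict String String)) (v : PySem.Dict String String)
    (sec : Option String) (raw : String) (h0 : PySem.Str.strip raw ≠ "")
    (h1 : pvIsHeadingA (PySem.Str.strip raw) = false) :
    pvStepA (vulns, some v, sec) raw =
      (vulns, some (pvSectionStepA v sec (PySem.Str.strip raw)).1,
        (pvSectionStepA v sec (PySem.Str.strip raw)).2) := by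
  simp [pvStepA, h0, h1]

theorem pvStepA_other_none (vulns : List (PySem.Dict String String)) (sec : Option String)
    (raw : String) (h0 : PySem.Str.strip raw ≠ "")
    (h1 : pvIsHeadingA (PySem.Str.strip raw) = false) :
    pvStepA (vulns, none, sec) raw = (vulns, none, sec) := by
  simp [pvStepA, h0, h1]

theorem pvStepB_other (bs : List (List String)) (raw : String) (h0 : PySem.Str.strip raw ≠ "")
    (h1 : pvIsHeadingB (PySem.Str.strip raw) = false) (h2 : bs ≠ []) :
    pvStepB bs raw = pvAppendLast bs (PySem.Str.strip raw) := by
  simp [pvStepB, h0, h1, h2]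

theorem pvStepB_other_nil (raw : String) (h0 : PySem.Str.strip raw ≠ "")
    (h1 : pvIsHeadingB (PySem.Str.strip raw) = false) :
    pvStepB [] raw = [] := by
  simp [pvStepB, h0, h1]

-- a fold of pvStepB never empties a non-empty block list
theorem pvFoldB_ne_nil (ls : List String) : ∀ bs : List (List String), bs ≠ [] →
    ls.foldl pvStepB bs ≠ [] := by
  induction ls with
  | nil => intro bs h; simpa using h
  | cons raw ls ih =>
    intro bs h
    simp only [List.foldl_cons]
    apply ih
    by_cases h0 : PySem.Str.strip raw = ""
    · rwa [pvStepB_empty _ _ h0]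
    · by_cases h1 : pvIsHeadingB (PySem.Str.strip raw) = true
      · rw [pvStepB_heading _ _ h0 h1]; simp
      · rw [pvStepB_other _ _ h0 (by simpa using h1) h]
        exact pvAppendLast_ne_nil _ _ h

-- A's "append current_vuln at the end" finisher
def pvFinishA (st : List (PySem.Dict String String) × Option (PySem.Dict String String) × Option String) :
    List (PySem.Dict String String) :=
  match st.2.1 with | some v => st.1 ++ [v] | none => st.1

-- B's parse state of a partial block (head already consumed)
def pvBlockFold (hd : String) (cur : List String) : PySem.Dict String String × Option String :=
  cur.foldl (fun st s => pvSectionStepB st.1 st.2 s) (pvInitVulnB hd, none)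

-- finishing the done blocks plus the open one is mapping the parser over all blocks
theorem pvMapClose (bsDone : List (List String)) (hd : String) (cur : List String) :
    bsDone.map pvParseBlockB ++ [(pvBlockFold hd cur).1] = (bsDone ++ [hd :: cur]).map pvParseBlockB := by
  simp [pvParseBlockB, pvBlockFold]

theorem pvBlockFold_append (hd : String) (cur : List String) (s : String) :
    pvBlockFold hd (cur ++ [s]) =
      pvSectionStepB (pvBlockFold hd cur).1 (pvBlockFold hd cur).2 s := by
  simp [pvBlockFold, List.foldl_append]

-- the coupling invariant: with a current vulnerability open, A's state is the parse state of
-- B's last (partial) block and A's finished list is the parse of B's finished blocks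
theorem pvMain (ls : List String) : ∀ (bsDone : List (List String)) (hd : String) (cur : List String),
    pvFinishA (ls.foldl pvStepA
      (bsDone.map pvParseBlockB, some (pvBlockFold hd cur).1, (pvBlockFold hd cur).2))
    = (ls.foldl pvStepB (bsDone ++ [hd :: cur])).map pvParseBlockB := by
  induction ls with
  | nil =>
    intro bsDone hd cur
    simp only [List.foldl_nil, pvFinishA]
    exact pvMapClose bsDone hd cur
  | cons raw ls ih =>
    intro bsDone hd cur
    simp only [List.foldl_cons]
    by_cases h0 : PySem.Str.strip raw = ""
    · rw [pvStepA_empty _ _ h0, pvStepB_empty _ _ h0]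
      exact ih bsDone hd cur
    · by_cases h1 : pvIsHeadingA (PySem.Str.strip raw) = true
      · rw [pvStepA_heading _ _ h0 h1, pvStepB_heading _ _ h0 (by rw [← pvHeading_eq]; exact h1)]
        have e1 : pvNewVulnA (PySem.Str.strip raw) = (pvBlockFold (PySem.Str.strip raw) []).1 := by
          rw [pvNewVuln_eq]; rfl
        have e2 : (none : Option String) = (pvBlockFold (PySem.Str.strip raw) []).2 := rfl
        rw [show (match (some (pvBlockFold hd cur).1 : Option (PySem.Dict String String)) with
              | some v => bsDone.map pvParseBlockB ++ [v] | none => bsDone.map pvParseBlockB)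
            = bsDone.map pvParseBlockB ++ [(pvBlockFold hd cur).1] from rfl,
           pvMapClose bsDone hd cur, e1, e2]
        have := ih (bsDone ++ [hd :: cur]) (PySem.Str.strip raw) []
        simpa using this
      · rw [pvStepA_other _ _ _ _ h0 (by simpa using h1),
            pvStepB_other _ _ h0 (by rw [← pvHeading_eq]; simpa using h1) (by simp),
            pvSectionStep_eq, ← pvBlockFold_append, pvAppendLast_append]
        exact ih bsDone hd (cur ++ [PySem.Str.strip raw])

-- before the first heading both sides stay in their initial state
theorem pvPrefix (ls : List String) :
    (ls.foldl pvStepA ([], none, none) = ([], none, none) ∧ ls.foldl pvStepB ([] : List (List String)) = [])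
    ∨ (pvFinishA (ls.foldl pvStepA ([], none, none)) = (ls.foldl pvStepB []).map pvParseBlockB
       ∧ ls.foldl pvStepB ([] : List (List String)) ≠ []) := by
  induction ls with
  | nil => exact Or.inl ⟨rfl, rfl⟩
  | cons raw ls ih =>
    by_cases h0 : PySem.Str.strip raw = ""
    · simpa only [List.foldl_cons, pvStepA_empty _ _ h0, pvStepB_empty _ _ h0] using ih
    · by_cases h1 : pvIsHeadingA (PySem.Str.strip raw) = true
      · right
        simp only [List.foldl_cons, pvStepA_heading _ _ h0 h1,
          pvStepB_heading _ _ h0 (by rw [← pvHeading_eq]; exact h1)]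
        constructor
        · have h := pvMain ls [] (PySem.Str.strip raw) []
          simp only [pvBlockFold, List.foldl_nil, List.map_nil, List.nil_append] at h
          simpa [← pvNewVuln_eq] using h
        · exact pvFoldB_ne_nil ls [[PySem.Str.strip raw]] (by simp)
      · simpa only [List.foldl_cons, pvStepA_other_none _ _ _ h0 (by simpa using h1),
          pvStepB_other_nil _ h0 (by rw [← pvHeading_eq]; simpa using h1)] using ih

-- ===== VERDICT (by name: the statement is the Claim_ definition above) =====
theorem process_text_response_spec : Claim_equal_process_text_response := by
  intro text _ _
  unfold Spec_process_text_response process_text_response process_text_response_alt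
  dsimp only
  rcases pvPrefix ((PySem.Str.split? text "\n").getD []) with ⟨hA, hB⟩ | ⟨hEq, hB⟩
  · rw [hA, hB]
    rfl
  · have hfin : (match ((((PySem.Str.split? text "\n").getD []).foldl pvStepA ([], none, none)).2.1 :
        Option (PySem.Dict String String)) with
      | some v => (((PySem.Str.split? text "\n").getD []).foldl pvStepA ([], none, none)).1 ++ [v]
      | none => (((PySem.Str.split? text "\n").getD []).foldl pvStepA ([], none, none)).1)
      = pvFinishA (((PySem.Str.split? text "\n").getD []).foldl pvStepA ([], none, none)) := rfl
    have hne : ((((PySem.Str.split? text "\n").getD []).foldl pvStepB []).map pvParseBlockB) ≠ [] := by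
      simpa using hB
    simp only [hfin, hEq, if_neg hne, if_neg hB]
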